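-- pv_equiv track=rewrite | github.com/choyeongwook/Algorithm | Programmers/Lv2/[1차]프렌즈4블록.py | solution
-- ===== SOURCE A (Python) =====
-- def solution(m, n, board):
--     # m, n = n, m # n: 높이, m: 폭
--
--     board_array = [[] for _ in range(len(board[0]))]
--
-- #     [5][0] -> [0][0]
-- #     [4][0] -> [0][1]
-- #     [3][0] -> [0][2]
-- #     ...
--
-- #     [5][1] -> [1][0]
-- #     [4][1] -> [1][1]
--     for i in range(len(board[0])):
--         for j in range(len(board)):
--             board_array[i].append(board[len(board)-1-j][i])
--
--     # print_board(board_array)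
--     result = 0
--     while True:
--         going_to_pop = set()
--         for i in range(len(board_array)-1):
--             m_length = min(len(board_array[i]), len(board_array[i+1]))
--             for j in range(m_length-1):
--                 if board_array[i][j] == board_array[i+1][j] == board_array[i][j+1] == board_array[i+1][j+1]:
--                     going_to_pop.add((i,j))
--                     going_to_pop.add((i+1,j))
--                     going_to_pop.add((i,j+1))
--                     going_to_pop.add((i+1,j+1))
--
--         if not going_to_pop:
--             break
--         for x, y in sorted(going_to_pop, key = lambda x: -x[1]):
--             board_array[x].pop(y)
--             result += 1
--
--         # print_board(board_array)
--
--
--     return result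
-- ===== SOURCE B (Python) =====
-- def solution(m, n, board):
--     # Predicate-based re-implementation: columns stored bottom-up; each pass a pure
--     # predicate decides which cells belong to a 2x2 block, columns are rebuilt by
--     # filtering (no global coordinate set, no sort, no in-place pops).
--     cols = [[row[i] for row in reversed(board)] for i in range(len(board[0]))]
--     removed = 0
--     while True:
--         def match2(i, j):
--             if i < 0 or j < 0 or i + 1 >= len(cols) or j + 1 >= min(len(cols[i]), len(cols[i + 1])):
--                 return False
--             ch = cols[i][j]
--             return ch == cols[i + 1][j] and ch == cols[i][j + 1] and ch == cols[i + 1][j + 1]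
--
--         def marked(i, j):
--             return match2(i, j) or match2(i, j - 1) or match2(i - 1, j) or match2(i - 1, j - 1)
--
--         survivors = [[ch for j, ch in enumerate(col) if not marked(i, j)]
--                      for i, col in enumerate(cols)]
--         hit = sum(len(cols[i]) - len(survivors[i]) for i in range(len(cols)))
--         if hit == 0:
--             return removed
--         removed += hit
--         cols = survivors
-- ===== Notes on version B (the rewrite author's own statement) =====
-- stated objective: simpler
-- what changed: Each removal pass is re-done with a pure 'marked' predicate and per-column filtering (rebuild each column keeping unmarked cells, count removals as length differences) instead of A's global coordinate set that is sorted by descending row and applied through in-place pops with a per-pop counter.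
import Mathlib
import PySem

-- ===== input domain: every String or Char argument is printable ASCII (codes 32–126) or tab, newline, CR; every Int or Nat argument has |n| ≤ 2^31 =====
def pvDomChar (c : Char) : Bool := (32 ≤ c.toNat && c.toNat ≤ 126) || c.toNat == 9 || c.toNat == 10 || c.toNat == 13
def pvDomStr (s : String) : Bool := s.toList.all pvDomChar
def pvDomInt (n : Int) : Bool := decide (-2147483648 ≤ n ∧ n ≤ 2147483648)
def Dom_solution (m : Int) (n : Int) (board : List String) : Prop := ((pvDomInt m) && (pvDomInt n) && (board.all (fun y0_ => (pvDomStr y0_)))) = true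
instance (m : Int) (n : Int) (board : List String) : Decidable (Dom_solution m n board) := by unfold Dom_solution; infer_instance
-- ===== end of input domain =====

-- B re-implements the cascading 2x2-block removal with a pure "marked" predicate and
-- per-column filtering instead of A's global coordinate set, sort and in-place pops;
-- objective: simpler (same asymptotic cost).

-- ===== PORT A =====
-- board_array built by the double append loop
def buildColsA (board : List String) : List (List Char) :=
  let w : Int := PySem.Str.len (PySem.List.pyGetD board 0 "")
  let h : Int := PySem.List.len board
  (PySem.List.pyRange 0 w 1).foldl (fun arr i =>
    (PySem.List.pyRange 0 h 1).foldl (fun arr j =>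
      PySem.List.pySetD arr i (PySem.List.pyGetD arr i [] ++
        [(PySem.Str.pyGet? (PySem.List.pyGetD board (h - 1 - j) "") i).getD ' '])) arr)
    ((PySem.List.pyRange 0 w 1).map (fun _ => ([] : List Char)))

-- going_to_pop
def popsA (cols : List (List Char)) : PySem.Set (Int × Int) :=
  (PySem.List.pyRange 0 (PySem.List.len cols - 1) 1).foldl (fun s i =>
    let ci := PySem.List.pyGetD cols i []
    let ci1 := PySem.List.pyGetD cols (i + 1) []
    let mlen := min (PySem.List.len ci) (PySem.List.len ci1)
    (PySem.List.pyRange 0 (mlen - 1) 1).foldl (fun s j =>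
      if (PySem.List.pyGetD ci j ' ' == PySem.List.pyGetD ci1 j ' ')
          && (PySem.List.pyGetD ci1 j ' ' == PySem.List.pyGetD ci (j + 1) ' ')
          && (PySem.List.pyGetD ci (j + 1) ' ' == PySem.List.pyGetD ci1 (j + 1) ' ')
      then PySem.Set.add (PySem.Set.add (PySem.Set.add (PySem.Set.add s (i, j)) (i + 1, j)) (i, j + 1)) (i + 1, j + 1)
      else s) s) PySem.Set.empty

-- body of 'for x, y in sorted(...): board_array[x].pop(y); result += 1'
def popOne (st : List (List Char) × Int) (p : Int × Int) : List (List Char) × Int :=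
  let col := PySem.List.pyGetD st.1 p.1 []
  (PySem.List.pySetD st.1 p.1 ((PySem.List.pop? col p.2).getD (' ', col)).2, st.2 + 1)

-- 'while True' loop (fuel strictly exceeds the number of cells, enough since every
-- non-final pass pops at least one cell)
def loopA : Nat → List (List Char) → Int → Int
  | 0, _, res => res
  | fuel + 1, cols, res =>
    let pops := popsA cols
    if pops.isEmpty then res
    else
      let st := (PySem.List.sorted pops (fun p => -p.2) false).foldl popOne (cols, res)
      loopA fuel st.1 st.2

def solution (m : Int) (n : Int) (board : List String) : Int :=
  let cols := buildColsA board
  loopA ((cols.map List.length).sum + 1) cols 0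

-- ===== PORT B =====
def pvMatch2 (cols : List (List Char)) (i j : Int) : Bool :=
  if i < 0 || j < 0 || PySem.List.len cols ≤ i + 1 ||
      min (PySem.List.len (PySem.List.pyGetD cols i []))
          (PySem.List.len (PySem.List.pyGetD cols (i + 1) [])) ≤ j + 1 then
    false
  else
    let ch := PySem.List.pyGetD (PySem.List.pyGetD cols i []) j ' '
    (ch == PySem.List.pyGetD (PySem.List.pyGetD cols (i + 1) []) j ' ')
      && (ch == PySem.List.pyGetD (PySem.List.pyGetD cols i []) (j + 1) ' ')
      && (ch == PySem.List.pyGetD (PySem.List.pyGetD cols (i + 1) []) (j + 1) ' ')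

def pvMarked (cols : List (List Char)) (i j : Int) : Bool :=
  pvMatch2 cols i j || pvMatch2 cols i (j - 1) || pvMatch2 cols (i - 1) j || pvMatch2 cols (i - 1) (j - 1)

def pvSurvivors (cols : List (List Char)) : List (List Char) :=
  (PySem.List.enumerate cols 0).map (fun ic =>
    ((PySem.List.enumerate ic.2 0).filter (fun p => !pvMarked cols ic.1 p.1)).map (·.2))

def pvHit (cols surv : List (List Char)) : Int :=
  ((PySem.List.pyRange 0 (PySem.List.len cols) 1).map (fun i =>
    PySem.List.len (PySem.List.pyGetD cols i []) - PySem.List.len (PySem.List.pyGetD surv i []))).sum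

def loopB : Nat → List (List Char) → Int → Int
  | 0, _, removed => removed
  | fuel + 1, cols, removed =>
    let surv := pvSurvivors cols
    let hit := pvHit cols surv
    if hit = 0 then removed else loopB fuel surv (removed + hit)

def solution_alt (m : Int) (n : Int) (board : List String) : Int :=
  let cols := (PySem.List.pyRange 0 (PySem.Str.len (PySem.List.pyGetD board 0 "")) 1).map
    (fun i => board.reverse.map (fun row => (PySem.Str.pyGet? row i).getD ' '))
  loopB ((cols.map List.length).sum + 1) cols 0

-- ===== PRECONDITION & SPEC =====
-- Pre_ excludes exactly the inputs on which the Python A raises IndexError: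
-- an empty board, or a row shorter than the first row.
def Pre_solution (m : Int) (n : Int) (board : List String) : Prop :=
  board ≠ [] ∧ ∀ row ∈ board, PySem.Str.len (board.headD "") ≤ PySem.Str.len row
instance (m : Int) (n : Int) (board : List String) : Decidable (Pre_solution m n board) := by
  unfold Pre_solution; infer_instance

def pvWitness_solution : Int × Int × List String := (2, 2, ["AB", "AA"])

def Spec_solution (m : Int) (n : Int) (board : List String) (out : Int) : Prop := out = solution_alt m n board
instance (m : Int) (n : Int) (board : List String) (out : Int) : Decidable (Spec_solution m n board out) := by unfold Spec_solution; infer_instance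

-- ===== CLAIM (what is proved, stated in full; the proofs are below) =====
def Claim_equal_solution : Prop := ∀ (m : Int) (n : Int) (board : List String), Dom_solution m n board → Pre_solution m n board → Spec_solution m n board (solution m n board)

-- ===== LEMMAS AND PROOFS =====


-- generic: a fold whose body leaves the accumulator unchanged
theorem foldl_fixed {α β : Type} (g : α → β → α) (acc : α) :
    ∀ (js : List β), (∀ j ∈ js, g acc j = acc) → js.foldl g acc = acc
  | [], _ => rfl
  | j :: js, h => by
    rw [List.foldl_cons, h j (by simp)]
    exact foldl_fixed g acc js (fun j hj => h j (by simp [hj]))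

theorem pyGetD_set_self (arr : List (List Char)) (i : Int) (acc : List Char)
    (h0 : 0 ≤ i) (hl : i < (arr.length : Int)) :
    PySem.List.pyGetD (PySem.List.pySetD arr i acc) i [] = acc := by
  rw [PySem.List.pySetD_of_nonneg arr acc h0,
    PySem.List.pyGetD_eq_getElem _ _ h0 (by simpa using hl)]
  simp

theorem set_self_pySetD (arr : List (List Char)) (i : Int)
    (h0 : 0 ≤ i) (hl : i < (arr.length : Int)) :
    arr = PySem.List.pySetD arr i (PySem.List.pyGetD arr i []) := by
  rw [PySem.List.pyGetD_eq_getElem _ _ h0 hl,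
    PySem.List.pySetD_of_nonneg _ _ h0, List.set_getElem_self]

theorem inner_fold (f : Int → Char) (i : Int) (arr : List (List Char))
    (h0 : 0 ≤ i) (hl : i < (arr.length : Int)) :
    ∀ (js : List Int) (acc : List Char),
      js.foldl (fun a j => PySem.List.pySetD a i (PySem.List.pyGetD a i [] ++ [f j]))
        (PySem.List.pySetD arr i acc)
      = PySem.List.pySetD arr i (acc ++ js.map f)
  | [], acc => by simp
  | j :: js, acc => by
    rw [List.foldl_cons, pyGetD_set_self arr i acc h0 hl]
    have h2 : PySem.List.pySetD (PySem.List.pySetD arr i acc) i (acc ++ [f j])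
        = PySem.List.pySetD arr i (acc ++ [f j]) := by
      rw [PySem.List.pySetD_of_nonneg arr acc h0,
        PySem.List.pySetD_of_nonneg _ _ h0, PySem.List.pySetD_of_nonneg arr _ h0, List.set_set]
    rw [h2, inner_fold f i arr h0 hl js (acc ++ [f j])]
    simp

theorem inner_fold' (f : Int → Char) (i : Int) (arr : List (List Char))
    (h0 : 0 ≤ i) (hl : i < (arr.length : Int)) (js : List Int) :
    js.foldl (fun a j => PySem.List.pySetD a i (PySem.List.pyGetD a i [] ++ [f j])) arr
      = PySem.List.pySetD arr i (PySem.List.pyGetD arr i [] ++ js.map f) := by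
  conv_lhs => rw [set_self_pySetD arr i h0 hl]
  exact inner_fold f i arr h0 hl js _

theorem outer_fold (F : Int → List Char → List Char) :
    ∀ (js : List Int) (arr : List (List Char)),
      (∀ j ∈ js, 0 ≤ j ∧ j < (arr.length : Int)) → js.Nodup →
      ((js.foldl (fun a i => PySem.List.pySetD a i (F i (PySem.List.pyGetD a i []))) arr).length
          = arr.length ∧
        ∀ (k : Nat), k < arr.length →
          (js.foldl (fun a i => PySem.List.pySetD a i (F i (PySem.List.pyGetD a i []))) arr)[k]? =
            some (if (k : Int) ∈ js then F k (arr.getD k []) else arr.getD k []))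
  | [], arr, _, _ => by
    refine ⟨rfl, fun k hk => ?_⟩
    simp [List.getD_eq_getElem?_getD, List.getElem?_eq_getElem hk]
  | j :: js, arr, hmem, hnd => by
    obtain ⟨hj0, hjl⟩ := hmem j (by simp)
    have harr1 : PySem.List.pySetD arr j (F j (PySem.List.pyGetD arr j []))
        = arr.set j.toNat (F j (PySem.List.pyGetD arr j [])) := PySem.List.pySetD_of_nonneg _ _ hj0
    have hlen1 : (PySem.List.pySetD arr j (F j (PySem.List.pyGetD arr j []))).length = arr.length := by
      rw [harr1]; simp
    have ih := outer_fold F js (PySem.List.pySetD arr j (F j (PySem.List.pyGetD arr j [])))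
      (fun x hx => by
        obtain ⟨a, b⟩ := hmem x (by simp [hx]); exact ⟨a, by rw [hlen1]; exact b⟩)
      (List.Nodup.of_cons hnd)
    refine ⟨by rw [List.foldl_cons, ih.1, hlen1], fun k hk => ?_⟩
    rw [List.foldl_cons, ih.2 k (by rw [hlen1]; exact hk)]
    have hjn : j.toNat < arr.length := by omega
    have hgd : PySem.List.pyGetD arr j [] = arr.getD j.toNat [] := by
      rw [PySem.List.pyGetD_eq_getElem _ _ hj0 hjl]
      simp [List.getD_eq_getElem?_getD, List.getElem?_eq_getElem hjn]
    by_cases hkj : (k : Int) = j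
    · have hkj' : k = j.toNat := by omega
      have hknotin : (k : Int) ∉ js := by
        rw [hkj]; exact (List.nodup_cons.mp hnd).1
      rw [if_neg hknotin, if_pos (by simp [hkj])]
      subst hkj'
      rw [harr1]
      simp [List.getD_eq_getElem?_getD, hjn, hgd, hkj]
    · have : (PySem.List.pySetD arr j (F j (PySem.List.pyGetD arr j []))).getD k []
          = arr.getD k [] := by
        rw [harr1]
        have hne : k ≠ j.toNat := by omega
        simp [List.getD_eq_getElem?_getD, List.getElem?_set_ne (by omega : j.toNat ≠ k)]
      rw [this]
      by_cases hin : (k : Int) ∈ js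
      · rw [if_pos hin, if_pos (by simp [hin])]
      · rw [if_neg hin, if_neg (by simp [hkj, hin])]

theorem cells_eq (board : List String) (i : Int) :
    (PySem.List.pyRange 0 (PySem.List.len board) 1).map
        (fun j => (PySem.Str.pyGet? (PySem.List.pyGetD board (PySem.List.len board - 1 - j) "") i).getD ' ')
      = board.reverse.map (fun row => (PySem.Str.pyGet? row i).getD ' ') := by
  have hcongr : ∀ j ∈ PySem.List.pyRange 0 (PySem.List.len board) 1,
      PySem.List.pyGetD board (PySem.List.len board - 1 - j) ""
        = PySem.List.pyGetD board.reverse j "" := by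
    intro j hj
    rw [PySem.List.mem_pyRange_one] at hj
    have hlen : PySem.List.len board = (board.length : Int) := by simp
    rw [hlen] at hj
    have hj1 : 0 ≤ PySem.List.len board - 1 - j := by rw [hlen]; omega
    have hj2 : PySem.List.len board - 1 - j < (board.length : Int) := by rw [hlen]; omega
    rw [PySem.List.pyGetD_eq_getElem _ _ hj1 hj2,
      PySem.List.pyGetD_eq_getElem _ _ hj.1 (by simpa using hj.2)]
    rw [List.getElem_reverse]
    congr 1
    rw [hlen]
    omega
  rw [List.map_congr_left (fun j hj => by rw [hcongr j hj])]
  have : (PySem.List.pyRange 0 (PySem.List.len board) 1).map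
      (fun j => (PySem.Str.pyGet? (PySem.List.pyGetD board.reverse j "") i).getD ' ')
      = ((PySem.List.pyRange 0 (PySem.List.len board) 1).map
          (fun j => PySem.List.pyGetD board.reverse j "")).map
        (fun row => (PySem.Str.pyGet? row i).getD ' ') := by
    rw [List.map_map]; rfl
  rw [this]
  rw [show PySem.List.len board = ((board.reverse.length : Nat) : Int) by simp]
  rw [PySem.List.map_pyGetD_pyRange_zero' board.reverse ""]

theorem build_eq (board : List String) :
    buildColsA board = (PySem.List.pyRange 0 (PySem.Str.len (PySem.List.pyGetD board 0 "")) 1).map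
      (fun i => board.reverse.map (fun row => (PySem.Str.pyGet? row i).getD ' ')) := by
  unfold buildColsA
  set w : Int := PySem.Str.len (PySem.List.pyGetD board 0 "") with hw
  set h : Int := PySem.List.len board with hh
  have hw0 : 0 ≤ w := by rw [hw]; simp
  set arr0 : List (List Char) := (PySem.List.pyRange 0 w 1).map (fun _ => ([] : List Char)) with harr0
  have hlen0 : arr0.length = w.toNat := by simp [harr0, PySem.List.length_pyRange_one]
  set F : Int → List Char → List Char := fun i col =>
    col ++ (PySem.List.pyRange 0 h 1).map
      (fun j => (PySem.Str.pyGet? (PySem.List.pyGetD board (h - 1 - j) "") i).getD ' ') with hF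
  have hbody : ∀ (a : List (List Char)) (i : Int), i ∈ PySem.List.pyRange 0 w 1 →
      (PySem.List.pyRange 0 h 1).foldl (fun a j => PySem.List.pySetD a i (PySem.List.pyGetD a i [] ++
        [(PySem.Str.pyGet? (PySem.List.pyGetD board (h - 1 - j) "") i).getD ' '])) a
      = PySem.List.pySetD a i (F i (PySem.List.pyGetD a i [])) := by
    intro a i hi
    rw [PySem.List.mem_pyRange_one] at hi
    simp only [hF]
    by_cases hil : i < (a.length : Int)
    · exact inner_fold' _ i a hi.1 hil (PySem.List.pyRange 0 h)
    · push Not at hil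
      have hnoop : ∀ (v : List Char), PySem.List.pySetD a i v = a := by
        intro v
        rw [PySem.List.pySetD_of_nonneg _ _ hi.1]
        exact List.set_eq_of_length_le (by omega)
      rw [hnoop]
      exact foldl_fixed _ a _ (fun j _ => hnoop _)
  rw [PySem.List.foldl_congr_mem' _ _ _ _ (fun i hi a => hbody a i hi)]
  have hof := outer_fold F (PySem.List.pyRange 0 w 1) arr0
    (fun j hj => by
      rw [PySem.List.mem_pyRange_one] at hj
      exact ⟨hj.1, by rw [hlen0]; omega⟩)
    (PySem.List.nodup_pyRange_one 0 w)
  apply List.ext_getElem?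
  intro k
  by_cases hk : k < arr0.length
  · rw [hof.2 k hk]
    rw [hlen0] at hk
    have hkw : (k : Int) ∈ PySem.List.pyRange 0 w 1 := by
      rw [PySem.List.mem_pyRange_one]
      omega
    rw [if_pos hkw]
    have hgd0 : arr0.getD k [] = [] := by
      simp [harr0, List.getD_eq_getElem?_getD]
    rw [hgd0]
    rw [List.getElem?_map, PySem.List.getElem?_pyRange_one]
    rw [if_pos (by omega : k < (w - 0).toNat)]
    simp only [Option.map_some, hF, List.nil_append, zero_add]
    rw [hh, cells_eq board (k : Int)]
  · rw [hlen0] at hk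
    rw [List.getElem?_eq_none (by rw [hof.1, hlen0]; omega)]
    rw [List.getElem?_eq_none]
    rw [List.length_map, PySem.List.length_pyRange_one]
    omega


-- ----- characterisation of going_to_pop -----

def pvCond (cols : List (List Char)) (i j : Int) : Bool :=
  (PySem.List.pyGetD (PySem.List.pyGetD cols i []) j ' ' == PySem.List.pyGetD (PySem.List.pyGetD cols (i + 1) []) j ' ')
    && (PySem.List.pyGetD (PySem.List.pyGetD cols (i + 1) []) j ' ' == PySem.List.pyGetD (PySem.List.pyGetD cols i []) (j + 1) ' ')
    && (PySem.List.pyGetD (PySem.List.pyGetD cols i []) (j + 1) ' ' == PySem.List.pyGetD (PySem.List.pyGetD cols (i + 1) []) (j + 1) ' ')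

def pvMlen (cols : List (List Char)) (i : Int) : Int :=
  min (PySem.List.len (PySem.List.pyGetD cols i [])) (PySem.List.len (PySem.List.pyGetD cols (i + 1) []))

theorem pvMatch2_iff (cols : List (List Char)) (i j : Int) :
    pvMatch2 cols i j = true ↔
      0 ≤ i ∧ 0 ≤ j ∧ i + 1 < PySem.List.len cols ∧ j + 1 < pvMlen cols i ∧ pvCond cols i j = true := by
  unfold pvMatch2 pvCond pvMlen
  simp only [PySem.List.len_eq]
  split_ifs with hg
  · simp only [false_iff]
    simp only [Bool.or_eq_true, decide_eq_true_eq, min_le_iff] at hg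
    rintro ⟨h1, h2, h3, h4, -⟩
    rw [lt_min_iff] at h4
    rcases hg with ((h | h) | h) | (h | h) <;> omega
  · simp only [Bool.or_eq_true, decide_eq_true_eq, not_or, not_lt, not_le] at hg
    obtain ⟨⟨⟨g1, g2⟩, g3⟩, g4⟩ := hg
    rw [lt_min_iff] at g4
    simp only [Bool.and_eq_true, beq_iff_eq]
    constructor
    · rintro ⟨⟨hab, hac⟩, had⟩
      rw [lt_min_iff]
      exact ⟨g1, g2, g3, g4, ⟨hab, hab ▸ hac⟩, hac ▸ had⟩
    · rw [lt_min_iff]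
      rintro ⟨-, -, -, -, ⟨hab, hbc⟩, hcd⟩
      exact ⟨⟨hab, hab.trans hbc⟩, (hab.trans hbc).trans hcd⟩

theorem mem_foldl_acc {α β : Type} (g : List α → β → List α) (C : β → α → Prop)
    (hg : ∀ s b x, x ∈ g s b ↔ x ∈ s ∨ C b x) :
    ∀ (l : List β) (s : List α) (x : α), x ∈ l.foldl g s ↔ x ∈ s ∨ ∃ b ∈ l, C b x
  | [], s, x => by simp
  | b :: l, s, x => by
    rw [List.foldl_cons, mem_foldl_acc g C hg l (g s b) x]
    simp only [hg, List.mem_cons]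
    constructor
    · rintro (⟨h | h⟩ | ⟨b', hb', hc⟩)
      · exact Or.inl h
      · exact Or.inr ⟨b, Or.inl rfl, h⟩
      · exact Or.inr ⟨b', Or.inr hb', hc⟩
    · rintro (h | ⟨b', hb' | hb', hc⟩)
      · exact Or.inl (Or.inl h)
      · exact Or.inl (Or.inr (hb' ▸ hc))
      · exact Or.inr ⟨b', hb', hc⟩

theorem nodup_foldl_acc {α β : Type} (g : List α → β → List α)
    (hg : ∀ s b, s.Nodup → (g s b).Nodup) :
    ∀ (l : List β) (s : List α), s.Nodup → (l.foldl g s).Nodup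
  | [], s, h => h
  | b :: l, s, h => by
    rw [List.foldl_cons]
    exact nodup_foldl_acc g hg l (g s b) (hg s b h)

theorem exists_match_iff_marked (cols : List (List Char)) (p : Int × Int) :
    (∃ i ∈ PySem.List.pyRange 0 (PySem.List.len cols - 1) 1,
        ∃ j ∈ PySem.List.pyRange 0 (pvMlen cols i - 1) 1,
          pvCond cols i j = true ∧
            (p = (i, j) ∨ p = (i + 1, j) ∨ p = (i, j + 1) ∨ p = (i + 1, j + 1)))
      ↔ pvMarked cols p.1 p.2 = true := by
  constructor
  · rintro ⟨i, hi, j, hj, hc, hp⟩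
    rw [PySem.List.mem_pyRange_one] at hi hj
    have hm : pvMatch2 cols i j = true :=
      (pvMatch2_iff cols i j).mpr ⟨hi.1, hj.1, by omega, by omega, hc⟩
    unfold pvMarked
    simp only [Bool.or_eq_true]
    rcases hp with h | h | h | h <;> subst h
    · exact Or.inl (Or.inl (Or.inl hm))
    · refine Or.inl (Or.inr ?_)
      rw [show (i + 1, j).1 - 1 = i by simp]
      exact hm
    · refine Or.inl (Or.inl (Or.inr ?_))
      rw [show (i, j + 1).2 - 1 = j by simp]
      exact hm
    · refine Or.inr ?_
      rw [show (i + 1, j + 1).1 - 1 = i by simp, show (i + 1, j + 1).2 - 1 = j by simp]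
      exact hm
  · intro hm
    unfold pvMarked at hm
    simp only [Bool.or_eq_true] at hm
    have mk : ∀ (a b : Int), pvMatch2 cols a b = true →
        a ∈ PySem.List.pyRange 0 (PySem.List.len cols - 1) 1 ∧
          b ∈ PySem.List.pyRange 0 (pvMlen cols a - 1) 1 ∧ pvCond cols a b = true := by
      intro a b h
      obtain ⟨h1, h2, h3, h4, h5⟩ := (pvMatch2_iff cols a b).mp h
      exact ⟨PySem.List.mem_pyRange_one.mpr ⟨h1, by omega⟩,
        PySem.List.mem_pyRange_one.mpr ⟨h2, by omega⟩, h5⟩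
    rcases hm with ((h | h) | h) | h
    · obtain ⟨m1, m2, m3⟩ := mk _ _ h
      exact ⟨p.1, m1, p.2, m2, m3, Or.inl rfl⟩
    · obtain ⟨m1, m2, m3⟩ := mk _ _ h
      refine ⟨p.1, m1, p.2 - 1, m2, m3, Or.inr (Or.inr (Or.inl ?_))⟩
      simp
    · obtain ⟨m1, m2, m3⟩ := mk _ _ h
      refine ⟨p.1 - 1, m1, p.2, m2, m3, Or.inr (Or.inl ?_)⟩
      simp
    · obtain ⟨m1, m2, m3⟩ := mk _ _ h
      refine ⟨p.1 - 1, m1, p.2 - 1, m2, m3, Or.inr (Or.inr (Or.inr ?_))⟩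
      simp

theorem popsA_eq (cols : List (List Char)) :
    popsA cols = (PySem.List.pyRange 0 (PySem.List.len cols - 1) 1).foldl
      (fun s i => (PySem.List.pyRange 0 (pvMlen cols i - 1) 1).foldl
        (fun s j => if pvCond cols i j = true then
            PySem.Set.add (PySem.Set.add (PySem.Set.add (PySem.Set.add s (i, j)) (i + 1, j)) (i, j + 1)) (i + 1, j + 1)
          else s) s) PySem.Set.empty := by
  unfold popsA pvMlen pvCond
  rfl

theorem mem_popsA (cols : List (List Char)) (p : Int × Int) :
    p ∈ popsA cols ↔ pvMarked cols p.1 p.2 = true := by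
  rw [popsA_eq]
  rw [mem_foldl_acc _
    (fun i x => ∃ j ∈ PySem.List.pyRange 0 (pvMlen cols i - 1) 1,
      pvCond cols i j = true ∧
        (x = (i, j) ∨ x = (i + 1, j) ∨ x = (i, j + 1) ∨ x = (i + 1, j + 1)))
    (fun s i x => by
      rw [mem_foldl_acc _
        (fun j x => pvCond cols i j = true ∧
          (x = (i, j) ∨ x = (i + 1, j) ∨ x = (i, j + 1) ∨ x = (i + 1, j + 1)))
        (fun s' j x' => by
          split_ifs with hc
          · simp only [PySem.Set.mem_add, hc, true_and]
            tauto
          · simp only [Bool.not_eq_true] at hc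
            simp [hc])
        (PySem.List.pyRange 0 (pvMlen cols i - 1) 1) s x])
    (PySem.List.pyRange 0 (PySem.List.len cols - 1) 1) PySem.Set.empty p]
  rw [← exists_match_iff_marked]
  simp only [PySem.Set.empty, List.not_mem_nil, false_or]

theorem nodup_popsA (cols : List (List Char)) : (popsA cols).Nodup := by
  rw [popsA_eq]
  exact nodup_foldl_acc _
    (fun s i hs => nodup_foldl_acc _
      (fun s' j hs' => by
        split_ifs with hc
        · exact PySem.Set.nodup_add _ _ (PySem.Set.nodup_add _ _
            (PySem.Set.nodup_add _ _ (PySem.Set.nodup_add _ _ hs')))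
        · exact hs') _ s hs) _ _ List.nodup_nil

theorem marked_bounds (cols : List (List Char)) (x y : Int)
    (h : pvMarked cols x y = true) :
    0 ≤ x ∧ x < (cols.length : Int) ∧ 0 ≤ y ∧ y < ((cols.getD x.toNat []).length : Int) := by
  have hget : ∀ (a : Int), 0 ≤ a →
      PySem.List.pyGetD cols a [] = cols.getD a.toNat [] := by
    intro a ha
    by_cases hl : a < (cols.length : Int)
    · rw [PySem.List.pyGetD_eq_getElem _ _ ha hl, List.getD_eq_getElem?_getD,
        List.getElem?_eq_getElem (by omega)]
      rfl
    · have hnone : PySem.List.pyGet? cols a = none :=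
        (PySem.List.pyGet?_eq_none_iff _ _).mpr (by
          unfold PySem.Raise.InRange
          omega)
      rw [PySem.List.pyGetD, hnone, List.getD_eq_getElem?_getD,
        List.getElem?_eq_none (by omega)]
  have hlen : PySem.List.len cols = (cols.length : Int) := by simp
  unfold pvMarked at h
  simp only [Bool.or_eq_true] at h
  rcases h with ((h | h) | h) | h <;>
    obtain ⟨h1, h2, h3, h4, -⟩ := (pvMatch2_iff _ _ _).mp h <;>
    rw [hlen] at h3 <;>
    unfold pvMlen at h4 <;>
    rw [lt_min_iff] at h4
  · rw [hget x h1] at h4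
    simp only [PySem.List.len_eq] at h4
    omega
  · rw [hget x h1] at h4
    simp only [PySem.List.len_eq] at h4
    omega
  · have hx0 : 0 ≤ x := by omega
    rw [show x - 1 + 1 = x by omega, hget x hx0] at h4
    simp only [PySem.List.len_eq] at h4
    omega
  · have hx0 : 0 ≤ x := by omega
    rw [show x - 1 + 1 = x by omega, hget x hx0] at h4
    simp only [PySem.List.len_eq] at h4
    omega


-- ----- the marked cells as a canonical list, and the pass count -----

def markedList (cols : List (List Char)) : List (Int × Int) :=
  (PySem.List.enumerate cols 0).flatMap (fun ic =>
    ((PySem.List.enumerate ic.2 0).filter (fun q => pvMarked cols ic.1 q.1)).map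
      (fun q => (ic.1, q.1)))

theorem getD_eq_getElem_of_lt {α : Type} (l : List α) (d : α) (k : Nat) (hk : k < l.length) :
    l.getD k d = l[k] := by
  rw [List.getD_eq_getElem?_getD, List.getElem?_eq_getElem hk]
  rfl

theorem mem_markedList (cols : List (List Char)) (p : Int × Int) :
    p ∈ markedList cols ↔ pvMarked cols p.1 p.2 = true := by
  unfold markedList
  rw [List.mem_flatMap]
  constructor
  · rintro ⟨ic, hic, hp⟩
    rw [PySem.List.mem_enumerate_iff] at hic
    obtain ⟨k, hk, rfl⟩ := hic
    rw [List.mem_map] at hp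
    obtain ⟨q, hq, rfl⟩ := hp
    rw [List.mem_filter] at hq
    exact hq.2
  · intro h
    obtain ⟨b1, b2, b3, b4⟩ := marked_bounds cols p.1 p.2 h
    have hk : p.1.toNat < cols.length := by omega
    have hcol : cols.getD p.1.toNat [] = cols[p.1.toNat] := getD_eq_getElem_of_lt _ _ _ hk
    have hj : p.2.toNat < (cols[p.1.toNat]).length := by
      rw [← hcol]; omega
    refine ⟨((p.1.toNat : Int), cols[p.1.toNat]), ?_, ?_⟩
    · rw [PySem.List.mem_enumerate_iff]
      exact ⟨p.1.toNat, hk, by simp⟩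
    · rw [List.mem_map]
      refine ⟨((p.2.toNat : Int), cols[p.1.toNat][p.2.toNat]), ?_, ?_⟩
      · rw [List.mem_filter]
        refine ⟨?_, ?_⟩
        · rw [PySem.List.mem_enumerate_iff]
          exact ⟨p.2.toNat, hj, by simp⟩
        · rw [show ((p.1.toNat : Nat) : Int) = p.1 by omega,
            show ((p.2.toNat : Nat) : Int) = p.2 by omega]
          exact h
      · rw [show ((p.1.toNat : Nat) : Int) = p.1 by omega,
          show ((p.2.toNat : Nat) : Int) = p.2 by omega]

theorem nodup_flatMap_of {α β : Type} (f : α → List β) :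
    ∀ (l : List α), (∀ x ∈ l, (f x).Nodup) →
      l.Pairwise (fun a b => ∀ y ∈ f a, y ∉ f b) → (l.flatMap f).Nodup
  | [], _, _ => by simp
  | a :: l, h1, h2 => by
    rw [List.flatMap_cons]
    refine List.Nodup.append (h1 a (by simp))
      (nodup_flatMap_of f l (fun x hx => h1 x (by simp [hx])) (List.Pairwise.of_cons h2)) ?_
    intro y hy hy2
    rw [List.mem_flatMap] at hy2
    obtain ⟨x, hx, hyx⟩ := hy2
    exact (List.pairwise_cons.mp h2).1 x hx y hy hyx

theorem nodup_markedList (cols : List (List Char)) : (markedList cols).Nodup := by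
  unfold markedList
  apply nodup_flatMap_of
  · intro ic _
    have hp : (PySem.List.enumerate ic.2 0).Pairwise (fun a b => a.1 < b.1) :=
      PySem.List.pairwise_lt_enumerate _ _
    have hpf := hp.filter (fun q => pvMarked cols ic.1 q.1)
    show List.Pairwise (fun a b => a ≠ b) _
    rw [List.pairwise_map]
    exact hpf.imp (fun {a b} hab heq => by
      rw [Prod.mk.injEq] at heq
      omega)
  · have hp : (PySem.List.enumerate cols 0).Pairwise (fun a b => a.1 < b.1) :=
      PySem.List.pairwise_lt_enumerate _ _
    refine hp.imp (fun {a b} hab => ?_)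
    intro y hy hy2
    rw [List.mem_map] at hy hy2
    obtain ⟨qa, -, ha⟩ := hy
    obtain ⟨qb, -, hb⟩ := hy2
    rw [← ha, Prod.mk.injEq] at hb
    omega

theorem surv_getD (cols : List (List Char)) (i : Int) (h0 : 0 ≤ i) (hl : i < (cols.length : Int)) :
    PySem.List.pyGetD (pvSurvivors cols) i []
      = ((PySem.List.enumerate (PySem.List.pyGetD cols i []) 0).filter
          (fun p => !pvMarked cols i p.1)).map (fun p => p.2) := by
  unfold pvSurvivors
  rw [PySem.List.enumerate_eq_map_pyRange cols [], List.map_map]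
  rw [PySem.List.pyGetD_map_pyRange_of_nonneg _ (PySem.List.len cols) i _ h0 (by simpa using hl)]
  simp only [Function.comp_apply]

theorem sum_natCast_map {α : Type} (g : α → Nat) :
    ∀ (l : List α), ((l.map g).sum : Int) = (l.map (fun a => ((g a : Nat) : Int))).sum
  | [] => by simp
  | a :: l => by
    rw [List.map_cons, List.map_cons, List.sum_cons, List.sum_cons, ← sum_natCast_map g l]
    push_cast
    ring

theorem hit_eq_length (cols : List (List Char)) :
    pvHit cols (pvSurvivors cols) = ((markedList cols).length : Int) := by
  unfold pvHit markedList
  rw [List.length_flatMap, PySem.List.enumerate_eq_map_pyRange cols [], List.map_map,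
    sum_natCast_map]
  refine congrArg List.sum (List.map_congr_left ?_)
  intro i hi
  rw [PySem.List.mem_pyRange_one] at hi
  simp only [PySem.List.len_eq] at hi
  obtain ⟨h0, hl⟩ := hi
  simp only [Function.comp_apply]
  rw [surv_getD cols i h0 hl]
  simp only [PySem.List.len_eq, List.length_map]
  have hsplit := List.length_eq_length_filter_add
    (l := PySem.List.enumerate (PySem.List.pyGetD cols i []) 0)
    (fun q => pvMarked cols i q.1)
  rw [PySem.List.length_enumerate] at hsplit
  have hnot : (PySem.List.enumerate (PySem.List.pyGetD cols i []) 0).filter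
      (fun q => !pvMarked cols i q.1)
      = (PySem.List.enumerate (PySem.List.pyGetD cols i []) 0).filter
        (fun q => !(fun q => pvMarked cols i q.1) q) := rfl
  omega

theorem perm_popsA_markedList (cols : List (List Char)) :
    (popsA cols).Perm (markedList cols) := by
  rw [List.perm_ext_iff_of_nodup (nodup_popsA cols) (nodup_markedList cols)]
  intro p
  rw [mem_popsA, mem_markedList]

theorem pops_empty_iff (cols : List (List Char)) :
    (popsA cols).isEmpty = true ↔ pvHit cols (pvSurvivors cols) = 0 := by
  rw [List.isEmpty_iff, hit_eq_length]
  have hlen := (perm_popsA_markedList cols).length_eq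
  constructor
  · intro h
    rw [h] at hlen
    simp at hlen
    omega
  · intro h
    have : (markedList cols).length = 0 := by omega
    rw [← List.length_eq_zero_iff, hlen, this]



-- ----- the pop loop as a per-column filter -----

def applyPop (cs : List (List Char)) (p : Int × Int) : List (List Char) :=
  PySem.List.pySetD cs p.1 ((PySem.List.pop? (PySem.List.pyGetD cs p.1 []) p.2).getD (' ', PySem.List.pyGetD cs p.1 [])).2

theorem foldl_popOne : ∀ (L : List (Int × Int)) (cols : List (List Char)) (res : Int),
    L.foldl popOne (cols, res) = (L.foldl applyPop cols, res + L.length)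
  | [], cols, res => by simp
  | p :: L, cols, res => by
    rw [List.foldl_cons, List.foldl_cons,
      show popOne (cols, res) p = (applyPop cols p, res + 1) from rfl,
      foldl_popOne L (applyPop cols p) (res + 1)]
    rw [Prod.mk.injEq]
    refine ⟨rfl, ?_⟩
    simp only [List.length_cons]
    push_cast
    ring

def removeBy (cols : List (List Char)) (P : Int → Int → Bool) : List (List Char) :=
  (PySem.List.enumerate cols 0).map (fun ic =>
    ((PySem.List.enumerate ic.2 0).filter (fun q => P ic.1 q.1)).map (fun q => q.2))

theorem survivors_eq_removeBy (cols : List (List Char)) :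
    pvSurvivors cols = removeBy cols (fun i j => !pvMarked cols i j) := rfl

theorem pyGetD_nonneg_getD {α : Type} (l : List α) (d : α) (a : Int) (ha : 0 ≤ a) :
    PySem.List.pyGetD l a d = l.getD a.toNat d := by
  by_cases hl : a < (l.length : Int)
  · rw [PySem.List.pyGetD_eq_getElem _ _ ha hl, List.getD_eq_getElem?_getD,
      List.getElem?_eq_getElem (by omega)]
    rfl
  · have hnone : PySem.List.pyGet? l a = none :=
      (PySem.List.pyGet?_eq_none_iff _ _).mpr (by
        unfold PySem.Raise.InRange
        omega)
    rw [PySem.List.pyGetD, hnone, List.getD_eq_getElem?_getD,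
      List.getElem?_eq_none (by omega)]

theorem filter_true_of_mem {α : Type} (l : List α) (q : α → Bool)
    (h : ∀ p ∈ l, q p = true) : l.filter q = l :=
  List.filter_eq_self.mpr h

theorem filter_enum_eraseIdx (col : List Char) (y : Nat) (hy : y < col.length) (q : Int → Bool)
    (hq : ∀ b : Int, (y : Int) ≤ b → q b = true) :
    ((PySem.List.enumerate (col.eraseIdx y) 0).filter (fun p => q p.1)).map (fun p => p.2)
      = ((PySem.List.enumerate col 0).filter (fun p => (!(p.1 == (y : Int))) && q p.1)).map (fun p => p.2) := by
  have htake : (col.take y).length = y := by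
    rw [List.length_take]
    omega
  have hdropall : ∀ (s : Int) (rest : List Char) (qq : Int × Char → Bool),
      (∀ p ∈ PySem.List.enumerate rest s, qq p = true) →
      ((PySem.List.enumerate rest s).filter qq).map (fun p => p.2) = rest := by
    intro s rest qq hall
    rw [filter_true_of_mem _ _ hall, PySem.List.map_snd_enumerate]
  rw [List.eraseIdx_eq_take_drop_succ]
  rw [PySem.List.enumerate_append, List.filter_append, List.map_append, htake]
  conv_rhs => rw [show col = col.take y ++ (col[y] :: col.drop (y + 1)) by
    rw [List.getElem_cons_drop, List.take_append_drop]]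
  rw [PySem.List.enumerate_append, List.filter_append, List.map_append, htake,
    PySem.List.enumerate_cons]
  have hhead : ((!((0 + (y : Int)) == (y : Int))) && q (0 + (y : Int))) = false := by
    simp
  rw [List.filter_cons]
  simp only [zero_add] at hhead ⊢
  rw [hhead, if_neg Bool.false_ne_true]
  congr 1
  · -- take parts agree
    congr 1
    apply List.filter_congr
    intro p hp
    rw [PySem.List.mem_enumerate_iff] at hp
    obtain ⟨k, hk, rfl⟩ := hp
    rw [htake] at hk
    have : ((0 + (k : Int)) == (y : Int)) = false := by
      simp
      omega
    simp only [zero_add] at this ⊢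
    rw [this, Bool.not_false, Bool.true_and]
  · -- drop parts are kept whole on both sides
    rw [hdropall _ _ _ (fun p hp => by
      rw [PySem.List.mem_enumerate_iff] at hp
      obtain ⟨k, hk, rfl⟩ := hp
      exact hq _ (by omega)),
      hdropall _ _ _ (fun p hp => by
        rw [PySem.List.mem_enumerate_iff] at hp
        obtain ⟨k, hk, rfl⟩ := hp
        have h1 : (((y : Int) + 1 + (k : Int)) == (y : Int)) = false := by
          simp
          omega
        rw [h1, Bool.not_false, Bool.true_and]
        exact hq _ (by omega))]

theorem length_removeBy (cols : List (List Char)) (P : Int → Int → Bool) :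
    (removeBy cols P).length = cols.length := by
  unfold removeBy
  rw [List.length_map, PySem.List.length_enumerate]

theorem foldl_applyPop_eq_removeBy :
    ∀ (L : List (Int × Int)) (cols : List (List Char)),
      L.Pairwise (fun p q => q.2 ≤ p.2) → L.Nodup →
      (∀ p ∈ L, 0 ≤ p.1 ∧ p.1 < (cols.length : Int) ∧ 0 ≤ p.2 ∧
        p.2 < ((cols.getD p.1.toNat []).length : Int)) →
      L.foldl applyPop cols = removeBy cols (fun a b => !decide ((a, b) ∈ L))
  | [], cols, _, _, _ => by
    unfold removeBy
    simp only [List.not_mem_nil, decide_false, Bool.not_false, List.filter_true,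
      PySem.List.map_snd_enumerate, List.foldl_nil]
  | (x, y) :: L, cols, hpw, hnd, hb => by
    obtain ⟨hx0, hxl, hy0, hyl⟩ := hb (x, y) (by simp)
    dsimp only at hx0 hxl hy0 hyl
    have hxn : x.toNat < cols.length := by omega
    have hyn : y.toNat < (cols.getD x.toNat []).length := by omega
    have hcolget : PySem.List.pyGetD cols x [] = cols.getD x.toNat [] :=
      pyGetD_nonneg_getD cols [] x hx0
    have happ : applyPop cols (x, y)
        = cols.set x.toNat ((cols.getD x.toNat []).eraseIdx y.toNat) := by
      unfold applyPop
      rw [hcolget, show y = ((y.toNat : Nat) : Int) by omega,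
        PySem.List.pop?_natCast _ _ hyn]
      rw [PySem.List.pySetD_of_nonneg _ _ hx0]
      simp only [Option.getD_some, Int.toNat_natCast]
    have hpwhead := (List.pairwise_cons.mp hpw).1
    have hndhead := (List.nodup_cons.mp hnd).1
    have hLb : ∀ p ∈ L, 0 ≤ p.1 ∧
        p.1 < (((cols.set x.toNat ((cols.getD x.toNat []).eraseIdx y.toNat)).length : Nat) : Int) ∧
        0 ≤ p.2 ∧
        p.2 < ((((cols.set x.toNat ((cols.getD x.toNat []).eraseIdx y.toNat)).getD p.1.toNat []).length : Nat) : Int) := by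
      intro p hp
      obtain ⟨p1, p2, p3, p4⟩ := hb p (by simp [hp])
      refine ⟨p1, by rw [List.length_set]; exact p2, p3, ?_⟩
      by_cases hpx : p.1.toNat = x.toNat
      · have hgd : ((cols.set x.toNat ((cols.getD x.toNat []).eraseIdx y.toNat)).getD p.1.toNat [])
            = (cols.getD x.toNat []).eraseIdx y.toNat := by
          rw [hpx, List.getD_eq_getElem?_getD, List.getElem?_set_self hxn]
          rfl
        rw [hgd, List.length_eraseIdx_of_lt hyn]
        have hple : p.2 ≤ y := hpwhead p hp
        have hpne : p.2 ≠ y := by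
          intro he
          apply hndhead
          have hpx' : p.1 = x := by omega
          rw [show p = (p.1, p.2) from rfl, hpx', he] at hp
          exact hp
        have : p.1 = x := by omega
        rw [this] at p4
        omega
      · have hgd : ((cols.set x.toNat ((cols.getD x.toNat []).eraseIdx y.toNat)).getD p.1.toNat [])
            = cols.getD p.1.toNat [] := by
          rw [List.getD_eq_getElem?_getD, List.getElem?_set_ne (by omega), ← List.getD_eq_getElem?_getD]
        rw [hgd]
        exact p4
    rw [List.foldl_cons, happ,
      foldl_applyPop_eq_removeBy L _ (List.Pairwise.of_cons hpw) (List.Nodup.of_cons hnd) hLb]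
    -- removeBy over the updated board equals removeBy over the original board
    apply List.ext_getElem?
    intro k
    by_cases hk : k < cols.length
    · unfold removeBy
      rw [List.getElem?_map, List.getElem?_map]
      have he1 : (PySem.List.enumerate (cols.set x.toNat ((cols.getD x.toNat []).eraseIdx y.toNat)) 0)[k]?
          = some ((k : Int), (cols.set x.toNat ((cols.getD x.toNat []).eraseIdx y.toNat))[k]'(by rw [List.length_set]; exact hk)) := by
        rw [List.getElem?_eq_getElem (by rw [PySem.List.length_enumerate, List.length_set]; exact hk),
          PySem.List.getElem_enumerate]
        simp
      have he2 : (PySem.List.enumerate cols 0)[k]? = some ((k : Int), cols[k]) := by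
        rw [List.getElem?_eq_getElem (by rw [PySem.List.length_enumerate]; exact hk),
          PySem.List.getElem_enumerate]
        simp
      rw [he1, he2]
      simp only [Option.map_some, Option.some.injEq]
      by_cases hkx : k = x.toNat
      · have hset : (cols.set x.toNat ((cols.getD x.toNat []).eraseIdx y.toNat))[k]'(by rw [List.length_set]; exact hk)
            = (cols.getD x.toNat []).eraseIdx y.toNat := by
          rw [List.getElem_set]
          rw [if_pos hkx.symm]
        rw [hset]
        have hcolk : cols.getD x.toNat [] = cols[k] := by
          rw [← hkx]
          exact getD_eq_getElem_of_lt _ _ _ hk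
        rw [hcolk] at hyn ⊢
        have hkx' : ((k : Nat) : Int) = x := by omega
        rw [filter_enum_eraseIdx cols[k] y.toNat hyn (fun b => !decide ((((k : Nat) : Int), b) ∈ L))
          (fun b hbge => by
            have : ¬ ((((k : Nat) : Int), b) ∈ L) := by
              intro hmem
              have hble : b ≤ y := by
                have := hpwhead _ hmem
                dsimp only at this
                omega
              have hbeq : b = y := by
                have hyy0 : ((y.toNat : Nat) : Int) = y := by omega
                omega
              apply hndhead
              rw [hkx', hbeq] at hmem
              exact hmem
            have hd : decide ((((k : Nat) : Int), b) ∈ L) = false := decide_eq_false this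
            dsimp only
            rw [hd]
            rfl)]
        congr 1
        apply List.filter_congr
        intro p _
        have hyy : ((y.toNat : Nat) : Int) = y := by omega
        rw [hyy]
        by_cases h1 : p.1 = y
        · have hmm : ((((k : Nat) : Int)), p.1) ∈ (x, y) :: L := by
            rw [h1, hkx']
            exact List.mem_cons_self
          have hd : decide (((((k : Nat) : Int)), p.1) ∈ (x, y) :: L) = true := decide_eq_true hmm
          rw [hd]
          simp [h1]
        · by_cases h2 : ((((k : Nat) : Int)), p.1) ∈ L
          · have hmm : ((((k : Nat) : Int)), p.1) ∈ (x, y) :: L := List.mem_cons_of_mem _ h2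
            have hd : decide (((((k : Nat) : Int)), p.1) ∈ (x, y) :: L) = true := decide_eq_true hmm
            have hd2 : decide (((((k : Nat) : Int)), p.1) ∈ L) = true := decide_eq_true h2
            rw [hd, hd2]
            simp
          · have hmm : ¬ (((((k : Nat) : Int)), p.1) ∈ (x, y) :: L) := by
              rw [List.mem_cons]
              rintro (he | he)
              · rw [Prod.mk.injEq] at he
                exact h1 he.2
              · exact h2 he
            have hd : decide (((((k : Nat) : Int)), p.1) ∈ (x, y) :: L) = false := decide_eq_false hmm
            have hd2 : decide (((((k : Nat) : Int)), p.1) ∈ L) = false := decide_eq_false h2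
            rw [hd, hd2]
            simp [h1]
      · have hset : (cols.set x.toNat ((cols.getD x.toNat []).eraseIdx y.toNat))[k]'(by rw [List.length_set]; exact hk)
            = cols[k] := by
          rw [List.getElem_set]
          rw [if_neg (by omega)]
        rw [hset]
        congr 1
        apply List.filter_congr
        intro p _
        have hne : ¬ (((k : Int), p.1) = (x, y)) := by
          rw [Prod.mk.injEq]
          rintro ⟨he, -⟩
          omega
        by_cases h2 : ((k : Int), p.1) ∈ L
        · have hmm : ((k : Int), p.1) ∈ (x, y) :: L := List.mem_cons_of_mem _ h2
          have hd : decide (((k : Int), p.1) ∈ (x, y) :: L) = true := decide_eq_true hmm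
          have hd2 : decide (((k : Int), p.1) ∈ L) = true := decide_eq_true h2
          rw [hd, hd2]
        · have hmm : ¬ (((k : Int), p.1) ∈ (x, y) :: L) := by
            rw [List.mem_cons]
            rintro (he | he)
            · exact hne he
            · exact h2 he
          have hd : decide (((k : Int), p.1) ∈ (x, y) :: L) = false := decide_eq_false hmm
          have hd2 : decide (((k : Int), p.1) ∈ L) = false := decide_eq_false h2
          rw [hd, hd2]
    · rw [List.getElem?_eq_none (by rw [length_removeBy, List.length_set]; omega),
        List.getElem?_eq_none (by rw [length_removeBy]; omega)]

theorem pops_step (cols : List (List Char)) (res : Int) :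
    ((PySem.List.sorted (popsA cols) (fun p => -p.2) false).foldl popOne (cols, res)) =
      (pvSurvivors cols, res + pvHit cols (pvSurvivors cols)) := by
  set L := PySem.List.sorted (popsA cols) (fun p => -p.2) false with hL
  have hperm : L.Perm (popsA cols) := PySem.List.sorted_perm _ _ _
  have hmemL : ∀ p, p ∈ L ↔ pvMarked cols p.1 p.2 = true :=
    fun p => hperm.mem_iff.trans (mem_popsA cols p)
  have hnd : L.Nodup := hperm.nodup_iff.mpr (nodup_popsA cols)
  have hpw0 : L.Pairwise (fun a b => -a.2 ≤ -b.2) := PySem.List.sorted_pairwise _ _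
  have hpw : L.Pairwise (fun p q => q.2 ≤ p.2) := hpw0.imp (fun h => by omega)
  have hbounds : ∀ p ∈ L, 0 ≤ p.1 ∧ p.1 < (cols.length : Int) ∧ 0 ≤ p.2 ∧
      p.2 < ((cols.getD p.1.toNat []).length : Int) :=
    fun p hp => marked_bounds cols p.1 p.2 ((hmemL p).mp hp)
  rw [foldl_popOne, foldl_applyPop_eq_removeBy L cols hpw hnd hbounds]
  rw [Prod.mk.injEq]
  constructor
  · rw [survivors_eq_removeBy]
    unfold removeBy
    apply List.map_congr_left
    intro ic _
    congr 1
    apply List.filter_congr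
    intro q _
    by_cases hm : (ic.1, q.1) ∈ L
    · have := (hmemL (ic.1, q.1)).mp hm
      simp [hm, this]
    · have hno : ¬ pvMarked cols ic.1 q.1 = true := fun hmk => hm ((hmemL (ic.1, q.1)).mpr hmk)
      have hf : pvMarked cols ic.1 q.1 = false := by
        cases hc : pvMarked cols ic.1 q.1
        · rfl
        · exact absurd hc hno
      simp [hm, hf]
  · rw [hit_eq_length]
    congr 1
    rw [hperm.length_eq, (perm_popsA_markedList cols).length_eq]

theorem loop_eq (fuel : Nat) (cols : List (List Char)) (res : Int) :
    loopA fuel cols res = loopB fuel cols res := by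
  induction fuel generalizing cols res with
  | zero => rfl
  | succ fuel ih =>
    show (if (popsA cols).isEmpty then res
          else
            let st := (PySem.List.sorted (popsA cols) (fun p => -p.2) false).foldl popOne (cols, res)
            loopA fuel st.1 st.2) =
         (if pvHit cols (pvSurvivors cols) = 0 then res
          else loopB fuel (pvSurvivors cols) (res + pvHit cols (pvSurvivors cols)))
    by_cases h : pvHit cols (pvSurvivors cols) = 0
    · rw [if_pos ((pops_empty_iff cols).mpr h), if_pos h]
    · rw [if_neg (by simpa using fun he => h ((pops_empty_iff cols).mp he)), if_neg h,
        pops_step cols res]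
      exact ih _ _

-- ===== VERDICT (by name: the statement is the Claim_ definition above) =====
theorem solution_spec : Claim_equal_solution := by
  intro m n board _ _
  show solution m n board = solution_alt m n board
  unfold solution solution_alt
  rw [build_eq]
  exact loop_eq _ _ _
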